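-- pv_equiv track=rewrite | github.com/Law-AI/ilsic | Codes/ILSIC/Ablation Study/Ablation Study on RAG Setups/RAG_gpt_k_stat_from_QQ-sBert.py | _hm_normalize_identifier_token
-- ===== SOURCE A (Python) =====
-- def _hm_normalize_identifier_token(token: str) -> str:
--     result = []
--     for c in token:
--         if c in "([":
--             break
--         if c.isalnum():
--             result.append(c)
--     return "".join(result)
-- ===== SOURCE B (Python) =====
-- def _hm_normalize_identifier_token(token: str) -> str:
--     # Stage 1: find the cut point (first '(' or '[') by index scan and truncate.
--     cut = 0
--     while cut < len(token) and token[cut] not in "([":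
--         cut += 1
--     head = token[:cut]
--     # Stage 2: keep only alphanumeric characters of the truncated head.
--     return "".join(c for c in head if c.isalnum())
-- ===== Notes on version B (the rewrite author's own statement) =====
-- stated objective: alternative
-- what changed: Replaces A's single char loop with an in-loop break-and-append by a two-stage decomposition: an index scan finds the first '(' or '[' and truncates the token, then a separate filter pass keeps the alphanumeric characters.
import Mathlib
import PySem

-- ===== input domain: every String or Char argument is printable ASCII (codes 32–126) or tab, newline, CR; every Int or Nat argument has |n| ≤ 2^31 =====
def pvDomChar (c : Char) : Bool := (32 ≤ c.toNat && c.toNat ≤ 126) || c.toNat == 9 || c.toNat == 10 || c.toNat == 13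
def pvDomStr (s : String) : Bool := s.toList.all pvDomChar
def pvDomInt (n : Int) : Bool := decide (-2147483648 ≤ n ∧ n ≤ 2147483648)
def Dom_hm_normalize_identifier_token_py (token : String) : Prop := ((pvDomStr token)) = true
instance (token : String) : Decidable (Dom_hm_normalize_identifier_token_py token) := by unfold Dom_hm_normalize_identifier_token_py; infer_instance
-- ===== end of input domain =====

-- ===== PORT A =====
-- B differs from A by decomposition: truncate at the first bracket, then filter alnum (objective: alternative).
-- loop of A: for c in token: break on '(' or '['; append alnum c to result
def pvALoop (acc : List Char) : List Char → List Char
  | [] => acc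
  | c :: rest =>
    if c == '(' || c == '[' then acc
    else if PySem.Chars.isalnum c then pvALoop (acc ++ [c]) rest
    else pvALoop acc rest

def hm_normalize_identifier_token_py (token : String) : String :=
  String.ofList (pvALoop [] token.toList)

-- ===== PORT B =====
-- while cut < len(token) and token[cut] not in "([": cut += 1
def pvBCut (cs : List Char) (cut : Nat) : Nat :=
  if h : cut < cs.length then
    if !(cs[cut] == '(' || cs[cut] == '[') then pvBCut cs (cut + 1)
    else cut
  else cut
termination_by cs.length - cut

def hm_normalize_identifier_token_py_alt (token : String) : String :=
  let cs := token.toList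
  let head := cs.take (pvBCut cs 0)                  -- head = token[:cut]
  String.ofList (head.filter PySem.Chars.isalnum)    -- "".join(c for c in head if c.isalnum())

-- ===== PRECONDITION & SPEC =====
def Spec_hm_normalize_identifier_token_py (token : String) (out : String) : Prop := out = hm_normalize_identifier_token_py_alt token
instance (token : String) (out : String) : Decidable (Spec_hm_normalize_identifier_token_py token out) := by unfold Spec_hm_normalize_identifier_token_py; infer_instance

-- ===== CLAIM (what is proved, stated in full; the proofs are below) =====
def Claim_equal_hm_normalize_identifier_token_py : Prop := ∀ (token : String), Dom_hm_normalize_identifier_token_py token → Spec_hm_normalize_identifier_token_py token (hm_normalize_identifier_token_py token)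

-- ===== LEMMAS AND PROOFS =====

def pvKeep (c : Char) : Bool := !(c == '(' || c == '[')

theorem pvALoop_eq (cs acc : List Char) :
    pvALoop acc cs = acc ++ (cs.takeWhile pvKeep).filter PySem.Chars.isalnum := by
  induction cs generalizing acc with
  | nil => simp [pvALoop]
  | cons c rest ih =>
    by_cases hb : (c == '(' || c == '[') = true
    · simp [pvALoop, hb, List.takeWhile, pvKeep]
    · simp only [Bool.not_eq_true] at hb
      by_cases ha : PySem.Chars.isalnum c = true
      · simp [pvALoop, hb, ha, ih, List.takeWhile, pvKeep]
      · simp [pvALoop, hb, ha, ih, List.takeWhile, pvKeep]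

theorem pvBCut_eq (cs : List Char) (cut : Nat) :
    pvBCut cs cut = cut + ((cs.drop cut).takeWhile pvKeep).length := by
  fun_induction pvBCut cs cut with
  | case1 cut h hb ih =>
    rw [ih]
    rw [List.drop_eq_getElem_cons h]
    simp [List.takeWhile, pvKeep, hb]
    omega
  | case2 cut h hb =>
    have hk : pvKeep cs[cut] = false := by
      simp only [pvKeep]
      simpa using hb
    rw [List.drop_eq_getElem_cons h, List.takeWhile_cons, hk]
    simp
  | case3 cut h =>
    rw [List.drop_eq_nil_of_le (by omega)]
    simp

theorem pvTake_cut (cs : List Char) :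
    cs.take (pvBCut cs 0) = cs.takeWhile pvKeep := by
  rw [pvBCut_eq]
  simp only [List.drop_zero, Nat.zero_add]
  exact (List.prefix_iff_eq_take.mp (List.takeWhile_prefix pvKeep)).symm

-- ===== VERDICT (by name: the statement is the Claim_ definition above) =====
theorem hm_normalize_identifier_token_py_spec : Claim_equal_hm_normalize_identifier_token_py := by
  intro token _
  unfold Spec_hm_normalize_identifier_token_py
  show String.ofList (pvALoop [] token.toList) =
      String.ofList ((token.toList.take (pvBCut token.toList 0)).filter PySem.Chars.isalnum)
  rw [pvALoop_eq, pvTake_cut]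
  simp
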